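-- pv_equiv track=rewrite | github.com/RegCookies/Offer-Sward | String/removeNestPair.py | removeNestPair
-- ===== SOURCE A (Python) =====
-- def removeNestPair(s1):
--     if s1 is None:
--         return s1
--
--     num_pair = 0
--     s = "("
--     for i in s1 :
--         if i == "(":
--             num_pair += 1
--         elif i == ")":
--             num_pair -= 1
--         else:
--             s += i
--     if num_pair != 0:
--         return False
--     else:
--         s += ")"
--     return s
-- ===== SOURCE B (Python) =====
-- def removeNestPair(s1):
--     if s1 is None:
--         return s1
--     if s1.count("(") != s1.count(")"):
--         return False
--     return "(" + s1.replace("(", "").replace(")", "") + ")"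
-- ===== Notes on version B (the rewrite author's own statement) =====
-- stated objective: idiomatic
-- what changed: Replaces the single balance-tracking accumulator loop with two library phases: a count-based balance test and paren stripping via chained str.replace, wrapping the result in one pair; no per-character loop or counter is maintained.
-- outside the precondition, e.g. on removeNestPair('(a'): A returns False, B returns False; on removeNestPair('('): A returns False, B returns False; on removeNestPair(')'): A returns False, B returns False
import Mathlib
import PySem

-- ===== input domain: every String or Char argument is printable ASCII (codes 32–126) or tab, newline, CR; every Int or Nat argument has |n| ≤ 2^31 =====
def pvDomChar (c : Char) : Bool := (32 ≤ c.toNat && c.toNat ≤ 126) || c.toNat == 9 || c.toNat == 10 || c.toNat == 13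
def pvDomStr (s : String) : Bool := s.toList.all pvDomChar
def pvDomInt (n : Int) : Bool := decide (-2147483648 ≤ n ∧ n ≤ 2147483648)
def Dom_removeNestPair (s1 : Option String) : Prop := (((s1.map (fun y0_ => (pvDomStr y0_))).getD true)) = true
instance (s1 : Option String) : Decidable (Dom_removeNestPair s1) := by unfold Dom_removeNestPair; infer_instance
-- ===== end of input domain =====

-- B changes the decomposition (balance test by counting + paren stripping by replace, instead of
-- one accumulator loop); equivalence is about the return value on balanced-or-None inputs (Pre_).

-- ===== PORT A =====
-- the loop body: num_pair/s accumulator updated per character, branches in A's order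
def removeNestPairStep (st : Int × List Char) (c : Char) : Int × List Char :=
  if c == '(' then (st.1 + 1, st.2)
  else if c == ')' then (st.1 - 1, st.2)
  else (st.1, st.2 ++ [c])

def removeNestPair (s1 : Option String) : Option String :=
  match s1 with
  | none => none
  | some str =>
    let r := str.toList.foldl removeNestPairStep (0, ['('])
    if r.1 ≠ 0 then
      none  -- Python A returns False here (not a str); excluded by Pre_removeNestPair
    else
      some (String.ofList (r.2 ++ [')']))

-- ===== PORT B =====
def removeNestPair_alt (s1 : Option String) : Option String :=
  match s1 with
  | none => none
  | some str =>
    if PySem.Str.count str "(" ≠ PySem.Str.count str ")" then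
      none  -- Python B returns False here (not a str); excluded by Pre_removeNestPair
    else
      some ("(" ++ PySem.Str.replace (PySem.Str.replace str "(" "") ")" "" ++ ")")

-- ===== PRECONDITION & SPEC =====
-- Pre_ excludes exactly the inputs on which Python A (and B alike) returns False, a bool, which is
-- not a value of the declared Optional[str] type: strings whose '(' and ')' counts differ.
def Pre_removeNestPair (s1 : Option String) : Prop :=
  ((s1.map (fun str => PySem.Str.count str "(" == PySem.Str.count str ")")).getD true) = true
instance (s1 : Option String) : Decidable (Pre_removeNestPair s1) := by unfold Pre_removeNestPair; infer_instance
def pvWitness_removeNestPair : Option String := some "a(b)(c)"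
def Spec_removeNestPair (s1 : Option String) (out : Option String) : Prop := out = removeNestPair_alt s1
instance (s1 : Option String) (out : Option String) : Decidable (Spec_removeNestPair s1 out) := by unfold Spec_removeNestPair; infer_instance

-- ===== CLAIM (what is proved, stated in full; the proofs are below) =====
def Claim_equal_removeNestPair : Prop := ∀ (s1 : Option String), Dom_removeNestPair s1 → Pre_removeNestPair s1 → Spec_removeNestPair s1 (removeNestPair s1)

-- ===== LEMMAS AND PROOFS =====

-- A's loop computes the running balance and the filtered characters
theorem removeNestPair_foldl (l : List Char) (n : Int) (acc : List Char) :
    l.foldl removeNestPairStep (n, acc) =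
      (n + (l.count '(' : Int) - (l.count ')' : Int),
       acc ++ l.filter (fun c => !(c == '(') && !(c == ')'))) := by
  induction l generalizing n acc with
  | nil => simp
  | cons c t ih =>
    by_cases h1 : c = '('
    · subst h1
      simp [removeNestPairStep, ih, List.count_cons]
      ring
    · by_cases h2 : c = ')'
      · subst h2
        simp [removeNestPairStep, ih, List.count_cons]
        ring
      · simp only [List.foldl_cons, removeNestPairStep, beq_iff_eq, h1, h2, if_false, ih,
          List.count_cons, List.filter_cons, Prod.mk.injEq]
        constructor
        · simp [h1, h2]
        · simp [h1, h2]

-- Chars.count with a single-character needle is List.count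
theorem countGo_single (x : Char) (fuel : Nat) (l : List Char) (acc : Nat)
    (h : l.length ≤ fuel) :
    PySem.Chars.count.go [x] fuel l acc = acc + l.count x := by
  induction fuel generalizing l acc with
  | zero =>
    have : l = [] := List.eq_nil_of_length_eq_zero (Nat.le_zero.mp h)
    subst this; simp [PySem.Chars.count.go]
  | succ f ih =>
    cases l with
    | nil => simp [PySem.Chars.count.go]
    | cons c t =>
      rw [List.length_cons] at h
      have ht : t.length ≤ f := Nat.le_of_succ_le_succ h
      simp only [PySem.Chars.count.go]
      by_cases hc : x = c
      · subst hc
        simp only [List.isPrefixOf, BEq.rfl, Bool.true_and, List.isPrefixOf_nil_left, if_true,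
          List.length_singleton, List.drop_one, List.tail_cons]
        rw [ih t (acc + 1) ht]
        simp [List.count_cons]
        omega
      · have hpf : ([x].isPrefixOf (c :: t)) = false := by
          simp only [List.isPrefixOf, List.isPrefixOf_nil_left, Bool.and_true]
          exact beq_eq_false_iff_ne.mpr hc
        simp only [hpf, if_false]
        rw [ih t acc ht]
        have hxc : (x == c) = false := beq_eq_false_iff_ne.mpr hc
        simp [List.count_cons, hxc]
        exact fun hb => hc hb.symm

theorem count_single (x : Char) (l : List Char) :
    PySem.Chars.count l [x] = l.count x := by
  simp [PySem.Chars.count]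
  rw [countGo_single x l.length l 0 (le_refl _)]
  omega

-- Chars.replace of a single character by the empty string is a filter
theorem replaceGo_single (x : Char) (fuel : Nat) (l : List Char) (acc : List Char)
    (h : l.length ≤ fuel) :
    PySem.Chars.replace.go [x] [] fuel l acc = acc.reverse ++ l.filter (fun c => !(c == x)) := by
  induction fuel generalizing l acc with
  | zero =>
    have : l = [] := List.eq_nil_of_length_eq_zero (Nat.le_zero.mp h)
    subst this; simp [PySem.Chars.replace.go]
  | succ f ih =>
    cases l with
    | nil => simp [PySem.Chars.replace.go]
    | cons c t =>
      rw [List.length_cons] at h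
      have ht : t.length ≤ f := Nat.le_of_succ_le_succ h
      simp only [PySem.Chars.replace.go]
      by_cases hc : x = c
      · subst hc
        simp only [List.isPrefixOf, BEq.rfl, Bool.true_and, List.isPrefixOf_nil_left, if_true,
          List.length_singleton, List.drop_one, List.tail_cons, List.reverse_nil, List.nil_append]
        rw [ih t acc ht]
        simp [List.filter_cons]
      · have hpf : ([x].isPrefixOf (c :: t)) = false := by
          simp only [List.isPrefixOf, List.isPrefixOf_nil_left, Bool.and_true]
          exact beq_eq_false_iff_ne.mpr hc
        simp only [hpf, if_false]
        rw [ih t (c :: acc) ht]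
        have : (c == x) = false := beq_eq_false_iff_ne.mpr (fun hb => hc hb.symm)
        simp [List.filter_cons, this]

theorem replace_single (x : Char) (l : List Char) :
    PySem.Chars.replace l [x] [] = l.filter (fun c => !(c == x)) := by
  simp [PySem.Chars.replace]
  rw [replaceGo_single x l.length l [] (le_refl _)]
  simp

-- ===== VERDICT (by name: the statement is the Claim_ definition above) =====
theorem removeNestPair_spec : Claim_equal_removeNestPair := by
  intro s1 _ hpre
  unfold Spec_removeNestPair
  match s1 with
  | none => rfl
  | some str =>
    unfold Pre_removeNestPair at hpre
    have e1 : "(".toList = ['('] := rfl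
    have e2 : ")".toList = [')'] := rfl
    simp only [Option.map_some, Option.getD_some, beq_iff_eq, PySem.Str.count_eq, e1, e2,
      count_single] at hpre
    unfold removeNestPair removeNestPair_alt
    simp only [PySem.Str.count_eq, e1, e2, count_single, hpre, ne_eq, not_true_eq_false, if_false,
      removeNestPair_foldl, List.nil_append]
    have hz : (0 : Int) + (str.toList.count ')' : Int) - (str.toList.count ')' : Int) = 0 := by
      ring
    rw [hz]
    norm_num
    congr 1
    have hB : ("(" ++ PySem.Str.replace (PySem.Str.replace str "(" "") ")" "" ++ ")").toList
        = '(' :: (str.toList.filter (fun c => !(c == '(') && !(c == ')'))) ++ [')'] := by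
      have e0 : "".toList = ([] : List Char) := rfl
      simp only [String.toList_append, PySem.Str.toList_replace, e0, e1, e2, replace_single,
        List.filter_filter]
      have : ∀ c ∈ str.toList, (!(c == ')') && !(c == '(')) = (!(c == '(') && !(c == ')')) := by
        intro c _; rw [Bool.and_comm]
      rw [List.filter_congr this]
      rfl
    apply String.toList_injective
    rw [hB]
    simp
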